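-- pv_equiv track=rewrite | github.com/gwendolyn-harris/sketchbook | AoC/2021/Day10.py | get_completion_string
-- ===== SOURCE A (Python) =====
-- def get_completion_string(line: str) -> str:
--     stack = []
--     symbol_pairs = {")": "(", "]": "[", "}": "{", ">": "<"}
--     completion_pairs = {value: key for key, value in symbol_pairs.items()}
--     for char in line:
--         if char in symbol_pairs.values():
--             stack.append(char)
--         elif char in symbol_pairs.keys():
--             for i, symbol in reversed(list(enumerate(stack))):
--                 if symbol == symbol_pairs[char]:
--                     stack.pop(i)
--                     break
--     result = [completion_pairs[char] for char in stack]
--     result.reverse()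
--     return result
-- ===== SOURCE B (Python) =====
-- def get_completion_string(line: str) -> str:
--     symbol_pairs = {")": "(", "]": "[", "}": "{", ">": "<"}
--     completion_pairs = {value: key for key, value in symbol_pairs.items()}
--     pending = {"(": 0, "[": 0, "{": 0, "<": 0}
--     result = []
--     # Scan right-to-left: a closer raises the pending count for its opener type;
--     # an opener either cancels one pending closer of its type or survives and
--     # is emitted immediately (survivors appear exactly in reversed order).
--     for char in reversed(line):
--         if char in symbol_pairs:
--             pending[symbol_pairs[char]] += 1
--         elif char in pending:
--             if pending[char] > 0:
--                 pending[char] -= 1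
--             else:
--                 result.append(completion_pairs[char])
--     return result
-- ===== Notes on version B (the rewrite author's own statement) =====
-- stated objective: faster
-- what changed: A keeps an explicit opener stack and, for every closer, rescans the whole stack in reverse to find and pop the matching opener (and finally maps and reverses the leftover stack); B makes a single right-to-left pass with one pending-closer counter per bracket type, emitting each surviving opener's closer immediately in output order.
import Mathlib
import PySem

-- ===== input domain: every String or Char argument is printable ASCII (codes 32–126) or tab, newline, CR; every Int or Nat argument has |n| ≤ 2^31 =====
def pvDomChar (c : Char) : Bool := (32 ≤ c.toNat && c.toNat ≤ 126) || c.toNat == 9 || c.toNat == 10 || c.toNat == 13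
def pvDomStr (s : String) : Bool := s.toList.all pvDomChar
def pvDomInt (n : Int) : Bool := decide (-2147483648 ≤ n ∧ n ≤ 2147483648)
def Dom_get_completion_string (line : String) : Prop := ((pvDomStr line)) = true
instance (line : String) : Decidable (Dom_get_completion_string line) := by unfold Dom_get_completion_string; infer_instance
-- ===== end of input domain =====

-- B replaces A's quadratic stack-with-inner-reverse-scan by a single right-to-left pass
-- keeping one pending-closer counter per bracket type (objective: faster).

-- ===== PORT A =====

-- {")": "(", "]": "[", "}": "{", ">": "<"}
def pvSymbolPairs : PySem.Dict Char Char :=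
  PySem.Dict.ofList [(')', '('), (']', '['), ('}', '{'), ('>', '<')]

-- {value: key for key, value in symbol_pairs.items()}
def pvCompletionPairs : PySem.Dict Char Char :=
  PySem.Dict.ofList [('(', ')'), ('[', ']'), ('{', '}'), ('<', '>')]

-- the inner 'for i, symbol in reversed(list(enumerate(stack))): … stack.pop(i); break' loop
def pvFindPop (stack : List Char) (target : Char) : List (Int × Char) → List Char
  | [] => stack
  | (i, symbol) :: rest =>
      if symbol == target then
        match PySem.List.pop? stack i with   -- stack.pop(i); i is always in range here
        | some r => r.2
        | none => stack
      else pvFindPop stack target rest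

-- body of 'for char in line'
def pvAStep (stack : List Char) (ch : Char) : List Char :=
  if (PySem.Dict.values pvSymbolPairs).contains ch then stack ++ [ch]
  else if (PySem.Dict.keys pvSymbolPairs).contains ch then
    pvFindPop stack (pvSymbolPairs.getD ch ch) ((PySem.List.enumerate stack).reverse)
  else stack

def get_completion_string (line : String) : List String :=
  let stack := line.toList.foldl pvAStep []
  ((stack.map (fun c => (pvCompletionPairs.getD c c).toString)).reverse)

-- ===== PORT B =====

-- pending = {"(": 0, "[": 0, "{": 0, "<": 0}
def pvPending0 : PySem.Dict Char Int :=
  PySem.Dict.ofList [('(', 0), ('[', 0), ('{', 0), ('<', 0)]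

-- body of 'for char in reversed(line)'
def pvBStep (st : PySem.Dict Char Int × List String) (ch : Char) :
    PySem.Dict Char Int × List String :=
  if (PySem.Dict.keys pvSymbolPairs).contains ch then        -- char in symbol_pairs
    let t := pvSymbolPairs.getD ch ch
    (st.1.insert t (st.1.getD t 0 + 1), st.2)
  else if (PySem.Dict.keys st.1).contains ch then            -- char in pending
    if st.1.getD ch 0 > 0 then (st.1.insert ch (st.1.getD ch 0 - 1), st.2)
    else (st.1, st.2 ++ [(pvCompletionPairs.getD ch ch).toString])
  else st

def get_completion_string_alt (line : String) : List String :=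
  (line.toList.reverse.foldl pvBStep (pvPending0, [])).2

-- ===== PRECONDITION & SPEC =====
def Spec_get_completion_string (line : String) (out : List String) : Prop := out = get_completion_string_alt line
instance (line : String) (out : List String) : Decidable (Spec_get_completion_string line out) := by unfold Spec_get_completion_string; infer_instance

-- ===== CLAIM (what is proved, stated in full; the proofs are below) =====
def Claim_equal_get_completion_string : Prop := ∀ (line : String), Dom_get_completion_string line → Spec_get_completion_string line (get_completion_string line)

-- ===== LEMMAS AND PROOFS =====

-- the four opener characters
def pvK4 : List Char := ['(', '[', '{', '<']

def pvClose (c : Char) : String := (pvCompletionPairs.getD c c).toString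

-- B's fold written as a foldr (the foldr processes the LAST character of cs first,
-- exactly like B's left-to-right pass over the reversed list)
def pvBrun (cs : List Char) (st : PySem.Dict Char Int × List String) :
    PySem.Dict Char Int × List String :=
  cs.foldr (fun c acc => pvBStep acc c) st

-- abstract model of B's opener step, with the pending dict abstracted to a function
def pvMStep (c : Char) (st : (Char → Int) × List String) : (Char → Int) × List String :=
  if c ∈ pvK4 then
    (if st.1 c > 0 then (Function.update st.1 c (st.1 c - 1), st.2)
     else (st.1, st.2 ++ [pvClose c]))
  else st

def pvMrun (cs : List Char) (st : (Char → Int) × List String) : (Char → Int) × List String :=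
  cs.foldr pvMStep st

-- A's run with an explicit starting stack
def pvArun (s : List Char) (cs : List Char) : List Char := cs.foldl pvAStep s

-- A's whole closer step: erase the last occurrence of the matching opener (if any)
def pvAInner (s : List Char) (t : Char) : List Char :=
  pvFindPop s t ((PySem.List.enumerate s).reverse)

-- the pending dict seen as a counting function
def pvPhi (p : PySem.Dict Char Int) : Char → Int := fun c => p.getD c 0

theorem pvMStep_out (f : Char → Int) (o : List String) (c : Char) :
    pvMStep c (f, o) = ((pvMStep c (f, [])).1, o ++ (pvMStep c (f, [])).2) := by
  unfold pvMStep; split_ifs <;> simp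

theorem pvMrun_out (cs : List Char) (f : Char → Int) (o : List String) :
    pvMrun cs (f, o) = ((pvMrun cs (f, [])).1, o ++ (pvMrun cs (f, [])).2) := by
  induction cs with
  | nil => simp [pvMrun]
  | cons c cs ih =>
      have h : ∀ st, pvMrun (c :: cs) st = pvMStep c (pvMrun cs st) := fun _ => rfl
      rw [h, h, ih, pvMStep_out]
      conv_rhs =>
        rw [show pvMrun cs (f, []) = ((pvMrun cs (f, [])).1, (pvMrun cs (f, [])).2) from rfl,
            pvMStep_out]
      simp

theorem pvPhi_insert (p : PySem.Dict Char Int) (k : Char) (v : Int) :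
    pvPhi (p.insert k v) = Function.update (pvPhi p) k v := by
  funext c
  simp [pvPhi, PySem.Dict.getD_insert, Function.update_apply]

theorem pvBStep_keys (p : PySem.Dict Char Int) (o : List String) (c : Char)
    (hk : p.keys = pvK4) : (pvBStep (p, o) c).1.keys = pvK4 := by
  unfold pvBStep
  split_ifs with h1 h2 h3
  · -- increment branch: the target opener is already a key
    have hc : c ∈ [')', ']', '}', '>'] := by
      rw [show PySem.Dict.keys pvSymbolPairs = [')', ']', '}', '>'] from by decide] at h1
      simpa using h1
    have ht : pvSymbolPairs.getD c c ∈ pvK4 := by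
      fin_cases hc <;> decide
    simp only
    rw [PySem.Dict.keys_insert_of_contains _ _
      (by rw [PySem.Dict.contains_iff_mem_keys, hk]; exact ht)]
    exact hk
  · simp only
    rw [PySem.Dict.keys_insert_of_contains _ _
      (by rw [PySem.Dict.contains_iff_mem_keys]; simpa using h2)]
    exact hk
  · exact hk
  · exact hk

theorem pvBrun_keys (cs : List Char) (p : PySem.Dict Char Int) (o : List String)
    (hk : p.keys = pvK4) : (pvBrun cs (p, o)).1.keys = pvK4 := by
  induction cs with
  | nil => exact hk
  | cons c cs ih =>
      show (pvBStep (pvBrun cs (p, o)) c).1.keys = pvK4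
      rw [show pvBrun cs (p, o) = ((pvBrun cs (p, o)).1, (pvBrun cs (p, o)).2) from rfl]
      exact pvBStep_keys _ _ _ ih

theorem pvBStep_nonneg (p : PySem.Dict Char Int) (o : List String) (c : Char)
    (hn : ∀ x, 0 ≤ pvPhi p x) : ∀ x, 0 ≤ pvPhi (pvBStep (p, o) c).1 x := by
  unfold pvBStep
  split_ifs with h1 h2 h3 <;> intro x <;> simp only [pvPhi_insert, Function.update_apply]
  · split_ifs with he
    · have := hn (pvSymbolPairs.getD c c); simp only [pvPhi] at this; omega
    · exact hn x
  · split_ifs with he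
    · have : (0:Int) < p.getD c 0 := h3
      show (0:Int) ≤ p.getD c 0 - 1; omega
    · exact hn x
  · exact hn x
  · exact hn x

theorem pvBrun_nonneg (cs : List Char) (p : PySem.Dict Char Int) (o : List String)
    (hn : ∀ x, 0 ≤ pvPhi p x) : ∀ x, 0 ≤ pvPhi (pvBrun cs (p, o)).1 x := by
  induction cs with
  | nil => exact hn
  | cons c cs ih =>
      show ∀ x, 0 ≤ pvPhi (pvBStep (pvBrun cs (p, o)) c).1 x
      rw [show pvBrun cs (p, o) = ((pvBrun cs (p, o)).1, (pvBrun cs (p, o)).2) from rfl]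
      exact pvBStep_nonneg _ _ _ ih

-- pvFindPop over in-range indices commutes with appending one element to the stack
theorem pvFindPop_append (L : List (Int × Char)) (s : List Char) (x t : Char)
    (hL : ∀ q ∈ L, ∃ n : Nat, q.1 = (n : Int) ∧ n < s.length) :
    pvFindPop (s ++ [x]) t L = pvFindPop s t L ++ [x] := by
  induction L with
  | nil => rfl
  | cons q L ih =>
      obtain ⟨i, y⟩ := q
      obtain ⟨n, hi, hn⟩ := hL (i, y) (by simp)
      subst hi
      by_cases hy : (y == t) = true
      · simp only [pvFindPop, hy, if_true]
        rw [PySem.List.pop?_natCast s n hn,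
            PySem.List.pop?_natCast (s ++ [x]) n (by simp; omega),
            List.eraseIdx_append_of_lt_length hn]
      · simp only [pvFindPop, hy]
        exact ih (fun q hq => hL q (by simp [hq]))

theorem pvAInner_append (s : List Char) (x t : Char) :
    pvAInner (s ++ [x]) t = if x = t then s else pvAInner s t ++ [x] := by
  have he : PySem.List.enumerate (s ++ [x]) 0
      = PySem.List.enumerate s 0 ++ [((s.length : Int), x)] := by
    rw [PySem.List.enumerate_append]
    simp [PySem.List.enumerate_cons, PySem.List.enumerate_nil]
  unfold pvAInner
  rw [he, List.reverse_append]
  simp only [List.reverse_singleton, List.singleton_append]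
  by_cases hx : x = t
  · subst hx
    rw [if_pos rfl]
    simp only [pvFindPop, BEq.rfl, if_true]
    rw [PySem.List.pop?_natCast (s ++ [x]) s.length (by simp)]
    simp only
    rw [List.eraseIdx_append_of_length_le (le_refl _)]
    simp
  · rw [if_neg hx]
    simp only [pvFindPop, show (x == t) = false by simp [hx]]
    exact pvFindPop_append _ s x t (by
      intro q hq
      rw [List.mem_reverse, PySem.List.mem_enumerate_iff] at hq
      obtain ⟨k, hk, rfl⟩ := hq
      exact ⟨k, by simp, hk⟩)

-- every element of A's popped stack comes from the original stack
theorem pvFindPop_subset (L : List (Int × Char)) (s : List Char) (t : Char)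
    (hL : ∀ q ∈ L, ∃ n : Nat, q.1 = (n : Int) ∧ n < s.length) :
    ∀ y ∈ pvFindPop s t L, y ∈ s := by
  induction L with
  | nil => simp [pvFindPop]
  | cons q L ih =>
      obtain ⟨i, z⟩ := q
      obtain ⟨n, hi, hn⟩ := hL (i, z) (by simp)
      subst hi
      by_cases hz : (z == t) = true
      · simp only [pvFindPop, hz, if_true]
        rw [PySem.List.pop?_natCast s n hn]
        exact fun y hy => (List.eraseIdx_sublist s n).subset hy
      · simp only [pvFindPop, hz]
        exact ih (fun q hq => hL q (by simp [hq]))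

theorem pvAStep_open (s : List Char) (c : Char) (hs : ∀ x ∈ s, x ∈ pvK4) :
    ∀ x ∈ pvAStep s c, x ∈ pvK4 := by
  unfold pvAStep
  split_ifs with h1 h2
  · intro x hx
    rcases List.mem_append.mp hx with h | h
    · exact hs x h
    · have : c ∈ pvK4 := by
        rw [show PySem.Dict.values pvSymbolPairs = ['(', '[', '{', '<'] from by decide] at h1
        simpa [pvK4] using h1
      simpa using List.mem_singleton.mp h ▸ this
  · intro x hx
    exact hs x (pvFindPop_subset _ s _ (by
      intro q hq
      rw [List.mem_reverse, PySem.List.mem_enumerate_iff] at hq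
      obtain ⟨k, hk, rfl⟩ := hq
      exact ⟨k, by simp, hk⟩) x hx)
  · exact hs

-- with all counters zero, the model emits every opener's closer, in reverse order
theorem pvMrun_zero (s : List Char) (f : Char → Int) (hf : ∀ c, f c = 0)
    (hs : ∀ x ∈ s, x ∈ pvK4) :
    (pvMrun s (f, [])).2 = (s.map pvClose).reverse := by
  induction s using List.reverseRecOn with
  | nil => rfl
  | append_singleton s x ih =>
      have hx : x ∈ pvK4 := hs x (by simp)
      have hstep : pvMStep x (f, []) = (f, [pvClose x]) := by
        unfold pvMStep; dsimp only
        rw [if_pos hx, if_neg (by rw [hf x]; omega)]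
        simp
      unfold pvMrun
      rw [List.foldr_concat]
      show (pvMrun s (pvMStep x (f, []))).2 = _
      rw [hstep, pvMrun_out, ih (fun y hy => hs y (by simp [hy]))]
      simp

-- bumping the pending counter of t in the model = erasing the last t from A's stack
theorem pvSL (s : List Char) (f : Char → Int) (t : Char)
    (ht : t ∈ pvK4) (hf : ∀ c, 0 ≤ f c) :
    (pvMrun s (Function.update f t (f t + 1), [])).2 = (pvMrun (pvAInner s t) (f, [])).2 := by
  induction s using List.reverseRecOn generalizing f with
  | nil => rfl
  | append_singleton s x ih =>
      have hrun : ∀ (g : Char → Int) (l : List Char),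
          pvMrun (l ++ [x]) (g, []) = pvMrun l (pvMStep x (g, [])) := by
        intro g l; unfold pvMrun; rw [List.foldr_concat]
      rw [pvAInner_append, hrun]
      by_cases hxt : x = t
      · subst hxt
        rw [if_pos rfl]
        have hstep : pvMStep x (Function.update f x (f x + 1), []) = (f, []) := by
          unfold pvMStep; dsimp only
          rw [if_pos ht]
          rw [if_pos (show Function.update f x (f x + 1) x > 0 from by
                rw [Function.update_self]; have := hf x; omega)]
          rw [Function.update_self, Function.update_idem,
              show f x + 1 - 1 = f x from by omega, Function.update_eq_self]
        rw [hstep]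
      · rw [if_neg hxt, hrun]
        have hgx : Function.update f t (f t + 1) x = f x := Function.update_of_ne hxt _ _
        by_cases hx4 : x ∈ pvK4
        · by_cases hpos : f x > 0
          · have hstepR : pvMStep x (f, []) = (Function.update f x (f x - 1), []) := by
              unfold pvMStep; dsimp only
              rw [if_pos hx4, if_pos hpos]
            have hstepL : pvMStep x (Function.update f t (f t + 1), []) =
                (Function.update (Function.update f x (f x - 1)) t
                  (Function.update f x (f x - 1) t + 1), []) := by
              unfold pvMStep; dsimp only
              rw [if_pos hx4, if_pos (show Function.update f t (f t + 1) x > 0 from by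
                    rw [hgx]; exact hpos), hgx,
                  Function.update_comm (show t ≠ x from fun h => hxt h.symm),
                  Function.update_of_ne (show t ≠ x from fun h => hxt h.symm)]
            rw [hstepL, hstepR]
            exact ih (Function.update f x (f x - 1)) (fun c => by
              rcases eq_or_ne c x with rfl | hc
              · rw [Function.update_self]; omega
              · rw [Function.update_of_ne hc]; exact hf c)
          · have hstepR : pvMStep x (f, []) = (f, [pvClose x]) := by
              unfold pvMStep; dsimp only
              rw [if_pos hx4, if_neg hpos]
              simp
            have hstepL : pvMStep x (Function.update f t (f t + 1), []) =
                (Function.update f t (f t + 1), [pvClose x]) := by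
              unfold pvMStep; dsimp only
              rw [if_pos hx4, if_neg (show ¬ Function.update f t (f t + 1) x > 0 from by
                    rw [hgx]; exact hpos)]
              simp
            rw [hstepL, hstepR, pvMrun_out, pvMrun_out]
            dsimp only
            rw [ih f hf]
            simp [pvMrun_out (pvAInner s t) f [pvClose x]]
        · have hstepR : pvMStep x (f, []) = (f, []) := by
            unfold pvMStep; dsimp only
            rw [if_neg hx4]
          have hstepL : pvMStep x (Function.update f t (f t + 1), []) =
              (Function.update f t (f t + 1), []) := by
            unfold pvMStep; dsimp only
            rw [if_neg hx4]
          rw [hstepL, hstepR, ih f hf]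

theorem pvPhi0 (c : Char) : pvPhi pvPending0 c = 0 := by
  have h : pvPending0 = PySem.Dict.mk [('(', 0), ('[', 0), ('{', 0), ('<', 0)] := by rfl
  rw [pvPhi, h, PySem.Dict.getD_eq_get?_getD]
  simp [PySem.Dict.get?_mk_cons]
  split_ifs <;> rfl

-- MAIN LEMMA: B's output so far, followed by the model run over A's current stack
-- under B's current pending counters, equals A's final answer.
theorem pvML (cs : List Char) (s : List Char) (hs : ∀ x ∈ s, x ∈ pvK4) :
    (pvBrun cs (pvPending0, [])).2
      ++ (pvMrun s (pvPhi (pvBrun cs (pvPending0, [])).1, [])).2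
    = ((pvArun s cs).map pvClose).reverse := by
  induction cs generalizing s with
  | nil =>
      show ([] : List String) ++ (pvMrun s (pvPhi pvPending0, [])).2 = (s.map pvClose).reverse
      rw [List.nil_append, pvMrun_zero s _ pvPhi0 hs]
  | cons c cs ih =>
      have hkeysSym : PySem.Dict.keys pvSymbolPairs = [')', ']', '}', '>'] := by decide
      have hvalsSym : PySem.Dict.values pvSymbolPairs = ['(', '[', '{', '<'] := by decide
      have hkeys : (pvBrun cs (pvPending0, [])).1.keys = pvK4 :=
        pvBrun_keys cs pvPending0 [] (by decide)
      have hnn : ∀ x, 0 ≤ pvPhi (pvBrun cs (pvPending0, [])).1 x :=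
        pvBrun_nonneg cs pvPending0 [] (fun x => by simp [pvPhi0])
      have hcons : pvBrun (c :: cs) (pvPending0, []) = pvBStep (pvBrun cs (pvPending0, [])) c := rfl
      have hA : pvArun s (c :: cs) = pvArun (pvAStep s c) cs := rfl
      rw [hA, ← ih (pvAStep s c) (pvAStep_open s c hs), hcons]
      set St := pvBrun cs (pvPending0, []) with hSt
      by_cases hop : c ∈ pvK4
      · -- c is an opener
        have hopc : (PySem.Dict.values pvSymbolPairs).contains c = true := by
          rw [hvalsSym]; simpa [pvK4] using hop
        have hclc : (PySem.Dict.keys pvSymbolPairs).contains c = false := by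
          rw [hkeysSym]; fin_cases hop <;> decide
        have hAstep : pvAStep s c = s ++ [c] := by
          unfold pvAStep; rw [if_pos hopc]
        have hkc : (PySem.Dict.keys St.1).contains c = true := by
          rw [hkeys]; simpa [pvK4] using hop
        have hMrun : pvMrun (s ++ [c]) (pvPhi St.1, []) = pvMrun s (pvMStep c (pvPhi St.1, [])) := by
          unfold pvMrun; rw [List.foldr_concat]
        by_cases hpos : St.1.getD c 0 > 0
        · have hB : pvBStep St c = (St.1.insert c (St.1.getD c 0 - 1), St.2) := by
            unfold pvBStep; dsimp only
            rw [if_neg (fun hh => Bool.false_ne_true (hclc ▸ hh)), if_pos hkc, if_pos hpos]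
          have hM : pvMStep c (pvPhi St.1, []) = (Function.update (pvPhi St.1) c (pvPhi St.1 c - 1), []) := by
            unfold pvMStep; dsimp only
            rw [if_pos hop, if_pos (show pvPhi St.1 c > 0 from hpos)]
          rw [hB, hAstep, hMrun, hM]
          dsimp only
          rw [pvPhi_insert]
          rfl
        · have hB : pvBStep St c = (St.1, St.2 ++ [(pvCompletionPairs.getD c c).toString]) := by
            unfold pvBStep; dsimp only
            rw [if_neg (fun hh => Bool.false_ne_true (hclc ▸ hh)), if_pos hkc, if_neg hpos]
          have hM : pvMStep c (pvPhi St.1, []) = (pvPhi St.1, [pvClose c]) := by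
            unfold pvMStep; dsimp only
            rw [if_pos hop, if_neg (show ¬ pvPhi St.1 c > 0 from hpos)]
            simp
          rw [hB, hAstep, hMrun, hM, pvMrun_out s (pvPhi St.1) [pvClose c]]
          simp [pvClose]
      · -- c is not an opener
        have hopc : (PySem.Dict.values pvSymbolPairs).contains c = false := by
          rw [hvalsSym]; simpa [pvK4] using hop
        by_cases hcl : c ∈ [')', ']', '}', '>']
        · -- c is a closer
          have hclc : (PySem.Dict.keys pvSymbolPairs).contains c = true := by
            rw [hkeysSym]; simpa using hcl
          have ht4 : pvSymbolPairs.getD c c ∈ pvK4 := by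
            fin_cases hcl <;> decide
          have hAstep : pvAStep s c =
              pvAInner s (pvSymbolPairs.getD c c) := by
            unfold pvAStep pvAInner; rw [if_neg (fun hh => Bool.false_ne_true (hopc ▸ hh)), if_pos hclc]
          have hB : pvBStep St c =
              (St.1.insert (pvSymbolPairs.getD c c)
                (St.1.getD (pvSymbolPairs.getD c c) 0 + 1), St.2) := by
            unfold pvBStep; dsimp only
            rw [if_pos hclc]
          rw [hB, hAstep]
          dsimp only
          rw [pvPhi_insert]
          exact congrArg _ (pvSL s (pvPhi St.1) (pvSymbolPairs.getD c c) ht4 hnn)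
        · -- neither an opener nor a closer: both sides ignore c
          have hclc : (PySem.Dict.keys pvSymbolPairs).contains c = false := by
            rw [hkeysSym]; simpa using hcl
          have hkc : (PySem.Dict.keys St.1).contains c = false := by
            rw [hkeys]; simpa [pvK4] using hop
          have hAstep : pvAStep s c = s := by
            unfold pvAStep; rw [if_neg (fun hh => Bool.false_ne_true (hopc ▸ hh)), if_neg (fun hh => Bool.false_ne_true (hclc ▸ hh))]
          have hB : pvBStep St c = St := by
            unfold pvBStep
            rw [if_neg (fun hh => Bool.false_ne_true (hclc ▸ hh)), if_neg (fun hh => Bool.false_ne_true (hkc ▸ hh))]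
          rw [hB, hAstep]

-- ===== VERDICT (by name: the statement is the Claim_ definition above) =====
theorem get_completion_string_spec : Claim_equal_get_completion_string := by
  intro line _
  show get_completion_string line = get_completion_string_alt line
  unfold get_completion_string get_completion_string_alt
  rw [List.foldl_reverse]
  have h := pvML line.toList [] (by simp)
  rw [show (pvMrun [] (pvPhi (pvBrun line.toList (pvPending0, [])).1, [])).2 = [] from rfl,
      List.append_nil] at h
  exact h.symm
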